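-- pv_equiv track=rewrite | github.com/KruttikaBhat/COM526-Analytics-and-Systems-of-Big-Data | aclose.py | generateClosures
-- ===== SOURCE A (Python) =====
-- def generateClosures(transactions, generators):
--         """ Generate the closures of the generators
--         transactions : list of sets
--                 The list of transactions
--         generators : lists of lists
--                 The list of generator itemsets whose closures need to be computed
--         Returns
--         -------
--         list of sets
--                 The list of closures mapped from the generators
--         """
--
--         # The indices of transactions where generators occur
--         generators_trans_indices = [[] for _ in range(len(generators))]
--
--         for trans_index, transaction in enumerate(transactions):
--                 for generator_index, generator in enumerate(generators):
--                         if all(_item in transaction for _item in generator):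
--                                 generators_trans_indices[generator_index].append(trans_index)
--
--         generators_closures = []
--         for generator_trans_indices in generators_trans_indices:
--
--                 if generator_trans_indices:
--                         closure = transactions[generator_trans_indices[0]].copy()
--
--                 else:
--                         closure = set()
--
--                 for trans_index in generator_trans_indices[1:]:
--                         closure.intersection_update(transactions[trans_index])
--                 generators_closures.append(closure)
--
--         return generators_closures
-- ===== SOURCE B (Python) =====
-- def generateClosures(transactions, generators):
--     """Inverted index: item -> sorted posting list of transaction indices.
--     Per generator, intersect the posting lists of its distinct items
--     (stopping once empty) to get its occurrence indices, then intersect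
--     those transactions."""
--     postings = {}
--     for i, t in enumerate(transactions):
--         for item in t:
--             postings.setdefault(item, []).append(i)
--
--     closures = []
--     for gen in generators:
--         items = list(dict.fromkeys(gen))
--         if items:
--             inds = postings.get(items[0], [])
--             for item in items[1:]:
--                 if not inds:
--                     break
--                 p = set(postings.get(item, []))
--                 inds = [i for i in inds if i in p]
--         else:
--             inds = range(len(transactions))
--         closure = None
--         for i in inds:
--             if closure is None:
--                 closure = set(transactions[i])
--             else:
--                 closure = closure & transactions[i]
--         closures.append(closure if closure is not None else set())
--     return closures
-- ===== Notes on version B (the rewrite author's own statement) =====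
-- stated objective: faster
-- what changed: Replaces the transaction-major nested scan (testing every generator against every transaction) by an inverted index item->posting list built in one pass; each generator's occurrence indices are obtained by intersecting posting lists, then its transactions are intersected.
import Mathlib
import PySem

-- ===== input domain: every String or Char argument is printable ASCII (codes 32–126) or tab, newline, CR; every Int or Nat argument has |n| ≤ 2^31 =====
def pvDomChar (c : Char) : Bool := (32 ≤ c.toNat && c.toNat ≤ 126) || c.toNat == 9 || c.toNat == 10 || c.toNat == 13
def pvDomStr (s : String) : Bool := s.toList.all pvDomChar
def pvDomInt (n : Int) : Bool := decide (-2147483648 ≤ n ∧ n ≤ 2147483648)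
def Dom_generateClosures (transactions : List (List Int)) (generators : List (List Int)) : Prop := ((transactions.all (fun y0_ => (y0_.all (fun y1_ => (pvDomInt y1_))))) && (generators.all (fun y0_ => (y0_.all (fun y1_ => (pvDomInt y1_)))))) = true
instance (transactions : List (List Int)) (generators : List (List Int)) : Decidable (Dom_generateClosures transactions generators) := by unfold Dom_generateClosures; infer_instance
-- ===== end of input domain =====

-- B replaces A's transaction-major nested scan by an inverted index item -> posting list of
-- transaction indices; per generator the posting lists are intersected, then the transactions.
-- (timed measurably faster by the check on the generated large inputs)

-- ===== PORT A =====
def generateClosures (transactions : List (List Int)) (generators : List (List Int)) : List (List Int) :=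
  -- generators_trans_indices = [[] for _ in range(len(generators))]; double loop appending trans_index
  let gti :=
    (PySem.List.enumerate transactions 0).foldl
      (fun gti p =>
        (gti.zip generators).map
          (fun q => if q.2.all (fun item => p.2.contains item) then q.1 ++ [p.1] else q.1))
      (generators.map (fun _ => ([] : List Int)))
  -- second loop: intersect the listed transactions
  gti.foldl
    (fun acc inds =>
      let closure :=
        match inds with
        | [] => ([] : List Int)   -- closure = set()
        | i0 :: rest =>
          rest.foldl
            (fun c j => PySem.Set.inter c (PySem.List.pyGetD transactions j []))
            (PySem.List.pyGetD transactions i0 [])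
      acc ++ [closure])
    []

-- ===== PORT B =====
-- the 'for item in gen[1:]' loop with its 'if not inds: break'
def intersectInds (postings : PySem.Dict Int (List Int)) : List Int → List Int → List Int
  | inds, [] => inds
  | inds, item :: rest =>
    if inds.isEmpty then []
    else
      intersectInds postings
        (inds.filter (fun i => (PySem.Set.ofList (postings.getD item [])).contains i)) rest

def generateClosures_alt (transactions : List (List Int)) (generators : List (List Int)) : List (List Int) :=
  -- postings.setdefault(item, []).append(i)
  let postings :=
    (PySem.List.enumerate transactions 0).foldl
      (fun d p => p.2.foldl (fun d item => d.modify item [] (fun l => l ++ [p.1])) d)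
      (PySem.Dict.empty : PySem.Dict Int (List Int))
  generators.foldl
    (fun acc gen =>
      let inds : List Int :=
        match PySem.List.dedup gen with   -- items = list(dict.fromkeys(gen))
        | [] => PySem.List.pyRange 0 (transactions.length : Int) 1   -- range(len(transactions))
        | d0 :: drest => intersectInds postings (postings.getD d0 []) drest
      let closure :=
        (inds.foldl
          (fun c i =>
            match c with
            | none => some (PySem.List.pyGetD transactions i [])
            | some c => some (PySem.Set.inter c (PySem.List.pyGetD transactions i [])))
          none).getD []
      acc ++ [closure])
    []

-- ===== PRECONDITION & SPEC =====
-- Pre_ states the natural domain only: each transaction is a Python set (list[set[int]]), i.e. its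
-- element list is duplicate-free; no input a caller of A can build is excluded.
def Pre_generateClosures (transactions : List (List Int)) (generators : List (List Int)) : Prop :=
  ∀ t ∈ transactions, t.Nodup
instance (transactions : List (List Int)) (generators : List (List Int)) : Decidable (Pre_generateClosures transactions generators) := by unfold Pre_generateClosures; infer_instance
def pvWitness_generateClosures : List (List Int) × List (List Int) := ([[1, 2], [2, 3]], [[2], []])

def Spec_generateClosures (transactions : List (List Int)) (generators : List (List Int)) (out : List (List Int)) : Prop := out = generateClosures_alt transactions generators
instance (transactions : List (List Int)) (generators : List (List Int)) (out : List (List Int)) : Decidable (Spec_generateClosures transactions generators out) := by unfold Spec_generateClosures; infer_instance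

-- ===== CLAIM (what is proved, stated in full; the proofs are below) =====
def Claim_equal_generateClosures : Prop := ∀ (transactions : List (List Int)) (generators : List (List Int)), Dom_generateClosures transactions generators → Pre_generateClosures transactions generators → Spec_generateClosures transactions generators (generateClosures transactions generators)

-- ===== LEMMAS AND PROOFS =====

-- occIdxFrom T s g = indices (starting at s) of the transactions containing every item of g
def occIdxFrom (T : List (List Int)) (s : Int) (g : List Int) : List Int :=
  (PySem.List.enumerate T s).filterMap
    (fun p => if g.all (fun item => p.2.contains item) then some p.1 else none)

theorem all_congr_mem {l : List Int} {p q : Int → Bool} (h : ∀ x ∈ l, p x = q x) :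
    l.all p = l.all q := by
  induction l with
  | nil => rfl
  | cons a l ih =>
    simp only [List.all_cons, h a List.mem_cons_self,
      ih (fun x hx => h x (List.mem_cons_of_mem _ hx))]

theorem occIdxFrom_nil (s : Int) (g : List Int) : occIdxFrom [] s g = [] := rfl

theorem occIdxFrom_cons (t : List Int) (T : List (List Int)) (s : Int) (g : List Int) :
    occIdxFrom (t :: T) s g
      = (if g.all (fun item => t.contains item) then [s] else []) ++ occIdxFrom T (s + 1) g := by
  simp only [occIdxFrom, PySem.List.enumerate_cons, List.filterMap_cons]
  by_cases h : (g.all fun item => t.contains item) = true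
  · rw [if_pos h, if_pos h]; rfl
  · rw [if_neg h, if_neg h]; simp

theorem le_of_mem_occIdxFrom (T : List (List Int)) (s : Int) (g : List Int) :
    ∀ i ∈ occIdxFrom T s g, s ≤ i := by
  induction T generalizing s with
  | nil => simp [occIdxFrom_nil]
  | cons t T ih =>
    intro i hi
    rw [occIdxFrom_cons] at hi
    rcases List.mem_append.1 hi with h | h
    · split at h <;> simp_all
    · have := ih (s + 1) i h; omega

-- the zip-map shape of A's inner loop
theorem zip_map_if (G : List (List Int)) (f : List Int → List Int) (t0 : List Int) (i0 : Int) :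
    ((G.map f).zip G).map
        (fun q => if (q.2.all fun item => t0.contains item) = true then q.1 ++ [i0] else q.1)
      = G.map (fun g => if (g.all fun item => t0.contains item) = true then f g ++ [i0] else f g) := by
  induction G with
  | nil => rfl
  | cons g G ih => simp only [List.map_cons, List.zip_cons_cons, ih]

-- phase 1 of A
theorem phaseA (G : List (List Int)) :
    ∀ (T : List (List Int)) (s : Int) (f : List Int → List Int),
    (PySem.List.enumerate T s).foldl
      (fun gti p =>
        (gti.zip G).map
          (fun q => if q.2.all (fun item => p.2.contains item) then q.1 ++ [p.1] else q.1))
      (G.map f)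
      = G.map (fun g => f g ++ occIdxFrom T s g) := by
  intro T
  induction T with
  | nil => intro s f; simp [occIdxFrom_nil]
  | cons t T ih =>
    intro s f
    rw [PySem.List.enumerate_cons, List.foldl_cons]
    dsimp only
    rw [zip_map_if, ih (s + 1)]
    apply List.map_congr_left; intro g _
    rw [occIdxFrom_cons]
    by_cases h : (g.all fun item => t.contains item) = true
    · rw [if_pos h, if_pos h]; simp
    · rw [if_neg h, if_neg h]; simp

-- phase 1 of B : the postings dictionary
theorem postings_inner (i : Int) (x : Int) :
    ∀ (t : List Int), t.Nodup → ∀ (d : PySem.Dict Int (List Int)),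
    (t.foldl (fun d item => d.modify item [] (fun l => l ++ [i])) d).getD x []
      = d.getD x [] ++ (if t.contains x then [i] else []) := by
  intro t
  induction t with
  | nil => intro _ d; simp
  | cons a t ih =>
    intro hnd d
    rw [List.foldl_cons, ih hnd.of_cons]
    by_cases hx : x = a
    · subst hx
      have hxt : x ∉ t := (List.nodup_cons.1 hnd).1
      simp [PySem.Dict.getD_modify_self, hxt]
    · simp [PySem.Dict.getD_modify, hx]

theorem postings_spec (x : Int) :
    ∀ (T : List (List Int)), (∀ t ∈ T, t.Nodup) → ∀ (s : Int) (d : PySem.Dict Int (List Int)),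
    ((PySem.List.enumerate T s).foldl
      (fun d p => p.2.foldl (fun d item => d.modify item [] (fun l => l ++ [p.1])) d) d).getD x []
      = d.getD x [] ++ occIdxFrom T s [x] := by
  intro T
  induction T with
  | nil => intro _ s d; simp [occIdxFrom_nil]
  | cons t T ih =>
    intro hnd s d
    rw [PySem.List.enumerate_cons, List.foldl_cons,
      ih (fun u hu => hnd u (List.mem_cons_of_mem _ hu)) (s + 1)]
    dsimp only
    rw [postings_inner s x t (hnd t List.mem_cons_self) d, occIdxFrom_cons]
    by_cases h : x ∈ t <;> simp [h, List.append_assoc]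

-- the break-on-empty intersection loop = filter by all
theorem intersectInds_eq (postings : PySem.Dict Int (List Int)) :
    ∀ (rest : List Int) (inds : List Int),
    intersectInds postings inds rest
      = inds.filter (fun i => rest.all (fun item => (postings.getD item []).contains i)) := by
  intro rest
  induction rest with
  | nil => intro inds; simp [intersectInds]
  | cons a rest ih =>
    intro inds
    rw [intersectInds]
    by_cases he : inds.isEmpty
    · rw [if_pos he]
      rw [List.isEmpty_iff.1 he]
      simp
    · rw [if_neg he, ih, List.filter_filter]
      apply List.filter_congr; intro i _
      simp [PySem.Set.mem_ofList, Bool.and_comm]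

theorem filter_occIdx (g0 : Int) (rest : List Int) :
    ∀ (T : List (List Int)) (s : Int),
    (occIdxFrom T s [g0]).filter
        (fun i => rest.all (fun item => (occIdxFrom T s [item]).contains i))
      = occIdxFrom T s (g0 :: rest) := by
  intro T
  induction T with
  | nil => intro s; simp [occIdxFrom_nil]
  | cons t T ih =>
    intro s
    have hcont : ∀ (item i : Int), i ≠ s →
        ((occIdxFrom (t :: T) s [item]).contains i) = ((occIdxFrom T (s + 1) [item]).contains i) := by
      intro item i hi
      rw [occIdxFrom_cons]
      by_cases h : ([item].all fun x => t.contains x) = true <;> simp [hi]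
    have hconts : ∀ item : Int,
        ((occIdxFrom (t :: T) s [item]).contains s) = t.contains item := by
      intro item
      rw [occIdxFrom_cons]
      have hs : s ∉ occIdxFrom T (s + 1) [item] := fun h => by
        have := le_of_mem_occIdxFrom T (s + 1) [item] s h; omega
      by_cases h : item ∈ t <;> simp [h, hs]
    rw [occIdxFrom_cons, occIdxFrom_cons, List.filter_append]
    have htail :
        (occIdxFrom T (s + 1) [g0]).filter
            (fun i => rest.all fun item => (occIdxFrom (t :: T) s [item]).contains i)
          = occIdxFrom T (s + 1) (g0 :: rest) := by
      rw [← ih (s + 1)]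
      apply List.filter_congr
      intro i hi
      have hi1 : s + 1 ≤ i := le_of_mem_occIdxFrom T (s + 1) [g0] i hi
      exact all_congr_mem (fun item _ => hcont item i (by omega))
    have hhead :
        ((if ([g0].all fun item => t.contains item) = true then [s] else []).filter
            (fun i => rest.all fun item => (occIdxFrom (t :: T) s [item]).contains i))
          = (if ((g0 :: rest).all fun item => t.contains item) = true then [s] else []) := by
      by_cases hg : g0 ∈ t
      · rw [if_pos (by simpa using hg)]
        simp only [List.filter_cons, List.filter_nil]
        have h2 : (rest.all fun item => (occIdxFrom (t :: T) s [item]).contains s)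
            = rest.all fun item => t.contains item :=
          all_congr_mem (fun item _ => hconts item)
        rw [h2]
        by_cases hr : (rest.all fun item => t.contains item) = true
        · rw [if_pos hr, if_pos (by simp_all)]
        · rw [if_neg hr, if_neg (by simp_all)]
      · rw [if_neg (by simpa using hg), if_neg (by simp_all)]
        simp
    rw [htail, hhead]

-- phase 2
theorem phase2 (T : List (List Int)) (inds : List Int) :
    (match inds with
      | [] => ([] : List Int)
      | i0 :: rest =>
        rest.foldl (fun c j => PySem.Set.inter c (PySem.List.pyGetD T j []))
          (PySem.List.pyGetD T i0 []))
      = (inds.foldl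
          (fun c i =>
            match c with
            | none => some (PySem.List.pyGetD T i [])
            | some c => some (PySem.Set.inter c (PySem.List.pyGetD T i [])))
          none).getD [] := by
  cases inds with
  | nil => rfl
  | cons i0 rest =>
    simp only [List.foldl_cons]
    generalize PySem.List.pyGetD T i0 [] = c
    induction rest generalizing c with
    | nil => rfl
    | cons j rest ih => simp [ih]

theorem occIdxFrom_dedup (T : List (List Int)) (s : Int) (g : List Int) :
    occIdxFrom T s (PySem.List.dedup g) = occIdxFrom T s g := by
  unfold occIdxFrom
  congr 1
  funext p
  have h : ((PySem.List.dedup g).all fun item => p.2.contains item)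
      = (g.all fun item => p.2.contains item) := by
    apply Bool.eq_iff_iff.mpr
    simp only [List.all_eq_true]
    constructor
    · intro hall x hx
      exact hall x ((PySem.List.mem_dedup g x).2 hx)
    · intro hall x hx
      exact hall x ((PySem.List.mem_dedup g x).1 hx)
  rw [h]

theorem occIdxFrom_empty_gen (T : List (List Int)) (s : Int) :
    occIdxFrom T s [] = PySem.List.pyRange s (s + T.length) 1 := by
  rw [← PySem.List.map_fst_enumerate]
  simp [occIdxFrom]

-- ===== VERDICT (by name: the statement is the Claim_ definition above) =====
theorem generateClosures_spec : Claim_equal_generateClosures := by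
  intro T G _hdom hpre
  unfold Spec_generateClosures generateClosures generateClosures_alt
  dsimp only
  rw [phaseA G T 0 (fun _ => []), PySem.List.foldl_append_singleton_eq_map,
    PySem.List.foldl_append_singleton_eq_map, List.map_map]
  apply List.map_congr_left
  intro g _
  dsimp only [Function.comp]
  have hP : ∀ x : Int,
      ((PySem.List.enumerate T 0).foldl
        (fun d p => p.2.foldl (fun d item => d.modify item [] (fun l => l ++ [p.1])) d)
        (PySem.Dict.empty : PySem.Dict Int (List Int))).getD x []
      = occIdxFrom T 0 [x] := by
    intro x
    rw [postings_spec x T hpre 0 PySem.Dict.empty]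
    simp
  cases g with
  | nil =>
    rw [phase2 T, occIdxFrom_empty_gen]
    dsimp only [PySem.List.dedup]
    norm_num
  | cons g0 rest =>
    rw [phase2 T]
    have hd : PySem.List.dedup (g0 :: rest)
        = g0 :: PySem.Set.discard (PySem.Set.ofList rest) g0 := by
      simp [PySem.List.dedup_eq_ofList, PySem.Set.ofList_cons]
    rw [hd]
    dsimp only
    rw [intersectInds_eq, hP]
    have h1 : (fun i => ((PySem.Set.ofList rest).discard g0).all fun item =>
        (((PySem.List.enumerate T 0).foldl
          (fun d p => p.2.foldl (fun d item => d.modify item [] (fun l => l ++ [p.1])) d)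
          (PySem.Dict.empty : PySem.Dict Int (List Int))).getD item []).contains i)
        = (fun i => ((PySem.Set.ofList rest).discard g0).all fun item =>
            (occIdxFrom T 0 [item]).contains i) := by
      funext i
      exact all_congr_mem (fun item _ => by rw [hP item])
    rw [h1, filter_occIdx, ← hd, occIdxFrom_dedup]
    simp
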